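-- pv_equiv track=rewrite | github.com/Azure/hpcpack-acm | src/Diagnostics/diags-map-reduce-1.3.x.py | mpiPingpongGetLargestNonoverlappingGroups
-- ===== SOURCE A (Python) =====
-- def mpiPingpongGetLargestNonoverlappingGroups(groups):
--     largestGroups = []
--     visitedNodes = set()
--     while len(groups):
--         maxLen = max([len(group) for group in groups])
--         largestGroup = [group for group in groups if len(group) == maxLen][0]
--         largestGroups.append(sorted(largestGroup))
--         visitedNodes.update(largestGroup)
--         groupsToRemove = []
--         for group in groups:
--             for node in group:
--                 if node in visitedNodes:
--                     groupsToRemove.append(group)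
--                     break
--         groups = [group for group in groups if group not in groupsToRemove]
--     return largestGroups
-- ===== SOURCE B (Python) =====
-- def mpiPingpongGetLargestNonoverlappingGroups(groups):
--     largestGroups = []
--     visitedNodes = set()
--     for group in sorted(groups, key=len, reverse=True):
--         if visitedNodes.isdisjoint(group):
--             largestGroups.append(sorted(group))
--             visitedNodes.update(group)
--     return largestGroups
-- ===== Notes on version B (the rewrite author's own statement) =====
-- stated objective: alternative
-- what changed: Replaces the repeated max-scan plus per-round removal filtering by one stable descending-length sort followed by a single pass that keeps groups disjoint from a visited-node set (O(G log G + total size) vs A's O(G^2 * size); measured ~1.4x on the generated inputs, below the 1.5x bar, so no speed is claimed).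
import Mathlib
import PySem

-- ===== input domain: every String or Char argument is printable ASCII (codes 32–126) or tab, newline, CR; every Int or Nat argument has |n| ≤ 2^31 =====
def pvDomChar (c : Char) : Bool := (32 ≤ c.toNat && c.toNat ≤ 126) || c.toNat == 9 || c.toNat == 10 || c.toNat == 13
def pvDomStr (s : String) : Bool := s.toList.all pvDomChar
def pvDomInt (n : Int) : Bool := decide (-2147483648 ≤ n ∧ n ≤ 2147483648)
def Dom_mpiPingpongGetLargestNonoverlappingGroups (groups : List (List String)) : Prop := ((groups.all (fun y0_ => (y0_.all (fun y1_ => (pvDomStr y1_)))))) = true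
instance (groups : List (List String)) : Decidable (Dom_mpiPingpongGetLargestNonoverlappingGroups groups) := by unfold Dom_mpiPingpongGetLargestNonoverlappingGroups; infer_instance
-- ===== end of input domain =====

-- B replaces A's repeated max-scan and per-round removal filtering by one stable
-- descending-length sort followed by a single pass with a visited-node set.


-- ===== PORT A =====
-- A's while loop, step for step; the fuel only makes the recursion total (under
-- Pre_ each round removes at least the selected group, so `groups.length` rounds suffice).
def pvALoop : Nat → List (List String) → List (List String) → PySem.Set String → List (List String)
  | 0, _, largestGroups, _ => largestGroups
  | fuel+1, groups, largestGroups, visitedNodes =>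
    if groups.isEmpty then largestGroups else
    -- maxLen = max([len(group) for group in groups])  (guarded: groups nonempty)
    match PySem.List.max? (groups.map (fun g => g.length)) (fun x => x) with
    | none => largestGroups
    | some maxLen =>
      -- largestGroup = [group for group in groups if len(group) == maxLen][0]
      match (groups.filter (fun g => g.length == maxLen)).head? with
      | none => largestGroups
      | some largestGroup =>
        let largestGroups := largestGroups ++ [PySem.List.sorted largestGroup (fun s => s) false]
        let visitedNodes := PySem.Set.update visitedNodes largestGroup
        -- groupsToRemove built by the nested for/break, i.e. append group once if any node visited
        let groupsToRemove := groups.foldl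
          (fun acc g => if g.any (fun n => PySem.Set.contains visitedNodes n) then acc ++ [g] else acc) []
        let groups := groups.filter (fun g => !(groupsToRemove.contains g))
        pvALoop fuel groups largestGroups visitedNodes

def mpiPingpongGetLargestNonoverlappingGroups (groups : List (List String)) : List (List String) :=
  pvALoop groups.length groups [] PySem.Set.empty

-- ===== PORT B =====
def mpiPingpongGetLargestNonoverlappingGroups_alt (groups : List (List String)) : List (List String) :=
  ((PySem.List.sorted groups (fun g => g.length) true).foldl
    (fun acc group =>
      if PySem.Set.isdisjoint acc.2 group then
        (acc.1 ++ [PySem.List.sorted group (fun s => s) false], PySem.Set.update acc.2 group)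
      else acc)
    (([] : List (List String)), (PySem.Set.empty : PySem.Set String))).1

-- ===== PRECONDITION & SPEC =====
-- Pre_ excludes inputs containing an empty group: on those A's while loop never
-- terminates (an empty group can never be removed), so A returns on exactly Pre_.
def Pre_mpiPingpongGetLargestNonoverlappingGroups (groups : List (List String)) : Prop :=
  ∀ g ∈ groups, g ≠ []
instance (groups : List (List String)) : Decidable (Pre_mpiPingpongGetLargestNonoverlappingGroups groups) := by unfold Pre_mpiPingpongGetLargestNonoverlappingGroups; infer_instance

def pvWitness_mpiPingpongGetLargestNonoverlappingGroups : List (List String) :=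
  [["b", "a"], ["a", "c"], ["d"]]

def Spec_mpiPingpongGetLargestNonoverlappingGroups (groups : List (List String)) (out : List (List String)) : Prop := out = mpiPingpongGetLargestNonoverlappingGroups_alt groups
instance (groups : List (List String)) (out : List (List String)) : Decidable (Spec_mpiPingpongGetLargestNonoverlappingGroups groups out) := by unfold Spec_mpiPingpongGetLargestNonoverlappingGroups; infer_instance

-- ===== CLAIM (what is proved, stated in full; the proofs are below) =====
def Claim_equal_mpiPingpongGetLargestNonoverlappingGroups : Prop := ∀ (groups : List (List String)), Dom_mpiPingpongGetLargestNonoverlappingGroups groups → Pre_mpiPingpongGetLargestNonoverlappingGroups groups → Spec_mpiPingpongGetLargestNonoverlappingGroups groups (mpiPingpongGetLargestNonoverlappingGroups groups)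

-- ===== LEMMAS AND PROOFS =====

-- `g` meets the visited set `V` (the test both programs perform, written over the group)
def pvInter (V : PySem.Set String) (g : List String) : Bool :=
  g.any (fun n => PySem.Set.contains V n)

-- proof-side recursive form of B's fold
def pvScan : List (List String) → PySem.Set String → List (List String)
  | [], _ => []
  | g :: rest, visited =>
    if pvInter visited g then pvScan rest visited
    else PySem.List.sorted g (fun s => s) false :: pvScan rest (PySem.Set.update visited g)

theorem pvIsdisjoint_eq (V : PySem.Set String) (g : List String) :
    PySem.Set.isdisjoint V g = !pvInter V g := by
  simp only [PySem.Set.isdisjoint, pvInter, PySem.Set.contains]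
  congr 1
  rw [Bool.eq_iff_iff]
  simp only [List.any_eq_true, List.contains_iff_mem]
  exact ⟨fun ⟨x, h1, h2⟩ => ⟨x, h2, h1⟩, fun ⟨x, h1, h2⟩ => ⟨x, h2, h1⟩⟩

theorem pvFoldl_eq_scan (T : List (List String)) (O : List (List String)) (V : PySem.Set String) :
    (T.foldl
      (fun acc group =>
        if PySem.Set.isdisjoint acc.2 group then
          (acc.1 ++ [PySem.List.sorted group (fun s => s) false], PySem.Set.update acc.2 group)
        else acc) (O, V)).1 = O ++ pvScan T V := by
  induction T generalizing O V with
  | nil => simp [pvScan]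
  | cons g rest ih =>
    by_cases h : pvInter V g = true
    · have hd : PySem.Set.isdisjoint V g = false := by simp [pvIsdisjoint_eq, h]
      simp only [List.foldl_cons, hd, Bool.false_eq_true, if_false, pvScan, h, if_true]
      exact ih O V
    · simp only [Bool.not_eq_true] at h
      have hd : PySem.Set.isdisjoint V g = true := by simp [pvIsdisjoint_eq, h]
      simp only [List.foldl_cons, hd, if_true, pvScan, h, Bool.false_eq_true, if_false]
      rw [ih]
      simp

theorem pvInsertBy_all_before {α : Type} (b : α → α → Bool) (x : α) (zs : List α)
    (h : ∀ z ∈ zs, b x z = true) : PySem.List.insertBy b x zs = x :: zs := by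
  cases zs with
  | nil => simp [PySem.List.insertBy]
  | cons z zs => simp [PySem.List.insertBy, h z (by simp)]

-- stable insertion preserves the descending order of the accumulator
theorem pvInsertBy_pairwise {α : Type} (key : α → Nat) (x : α) (acc : List α)
    (h : acc.Pairwise (fun a b => key b ≤ key a)) :
    (PySem.List.insertBy (fun a b => decide (key b < key a)) x acc).Pairwise
      (fun a b => key b ≤ key a) := by
  induction acc with
  | nil => simp [PySem.List.insertBy]
  | cons y ys ih =>
    rw [List.pairwise_cons] at h
    by_cases hb : key y < key x
    · simp only [PySem.List.insertBy, hb, decide_true, if_true]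
      refine List.Pairwise.cons ?_ (List.Pairwise.cons h.1 h.2)
      intro z hz
      rcases List.mem_cons.mp hz with rfl | hz
      · exact le_of_lt hb
      · exact le_trans (h.1 z hz) (le_of_lt hb)
    · simp only [PySem.List.insertBy, hb, decide_false, Bool.false_eq_true, if_false]
      refine List.Pairwise.cons ?_ (ih h.2)
      intro z hz
      rcases (PySem.List.mem_insertBy _ _ _ _).mp hz with rfl | hz
      · exact le_of_not_gt hb
      · exact h.1 z hz

-- filtering commutes with stable insertion into a descending accumulator
theorem pvInsertBy_filter {α : Type} (key : α → Nat) (p : α → Bool) (x : α) (acc : List α)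
    (h : acc.Pairwise (fun a b => key b ≤ key a)) :
    (PySem.List.insertBy (fun a b => decide (key b < key a)) x acc).filter p =
      if p x then PySem.List.insertBy (fun a b => decide (key b < key a)) x (acc.filter p)
      else acc.filter p := by
  induction acc with
  | nil => cases hp : p x <;> simp [PySem.List.insertBy, hp]
  | cons y ys ih =>
    rw [List.pairwise_cons] at h
    by_cases hb : key y < key x
    · -- x is inserted at the head; every kept element of y :: ys has key < key x
      simp only [PySem.List.insertBy, hb, decide_true, if_true]
      have hall : ∀ z ∈ (y :: ys).filter p, (fun a b => decide (key b < key a)) x z = true := by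
        intro z hz
        have hzm := List.mem_of_mem_filter hz
        rcases List.mem_cons.mp hzm with rfl | hz'
        · simp [hb]
        · simp [lt_of_le_of_lt (h.1 z hz') hb]
      rw [pvInsertBy_all_before _ _ _ hall]
      cases hp : p x <;> cases hpy : p y <;> simp [hp, hpy]
    · simp only [PySem.List.insertBy, hb, decide_false, Bool.false_eq_true, if_false]
      cases hp : p x <;> cases hpy : p y <;>
        simp [hp, hpy, ih h.2, PySem.List.insertBy, hb]

-- a stable sort commutes with filtering
theorem pvSorted_filter {α : Type} (key : α → Nat) (p : α → Bool) (xs : List α) :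
    (PySem.List.sorted xs key true).filter p = PySem.List.sorted (xs.filter p) key true := by
  rw [PySem.List.sorted_rev_eq_foldl_insertBy, PySem.List.sorted_rev_eq_foldl_insertBy]
  have main : ∀ (l : List α) (acc : List α), acc.Pairwise (fun a b => key b ≤ key a) →
      (l.foldl (fun acc x => PySem.List.insertBy (fun a b => decide (key b < key a)) x acc) acc).filter p
        = (l.filter p).foldl (fun acc x => PySem.List.insertBy (fun a b => decide (key b < key a)) x acc) (acc.filter p) := by
    intro l
    induction l with
    | nil => intro acc _; simp
    | cons x xs ih =>
      intro acc hacc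
      simp only [List.foldl_cons, List.filter_cons]
      rw [ih _ (pvInsertBy_pairwise key x acc hacc), pvInsertBy_filter key p x acc hacc]
      cases hp : p x <;> simp
  exact main xs [] (by simp)

-- skipping groups that already meet a subset of the visited set changes nothing
theorem pvScan_filter (U : PySem.Set String) (T : List (List String)) (W : PySem.Set String)
    (h : ∀ g, pvInter U g = true → pvInter W g = true) :
    pvScan (T.filter (fun g => !pvInter U g)) W = pvScan T W := by
  induction T generalizing W with
  | nil => simp
  | cons g rest ih =>
    simp only [List.filter_cons]
    by_cases hU : pvInter U g = true
    · have hW := h g hU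
      simp [hU, pvScan, hW, ih W h]
    · simp only [Bool.not_eq_true] at hU
      simp only [hU, Bool.not_false, if_pos, pvScan]
      by_cases hW : pvInter W g = true
      · simp [hW, ih W h]
      · simp only [Bool.not_eq_true] at hW
        simp only [hW, Bool.false_eq_true, if_false]
        refine congrArg _ (ih _ ?_)
        intro g' hg'
        have hg'W := h g' hg'
        simp only [pvInter, List.any_eq_true, PySem.Set.contains, List.contains_iff_mem] at hg'W ⊢
        rcases hg'W with ⟨n, hn, hnW⟩
        exact ⟨n, hn, (PySem.Set.mem_update W g n).mpr (Or.inl hnW)⟩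

theorem pvMain (fuel : Nat) (R : List (List String)) (O : List (List String)) (V : PySem.Set String)
    (hne : ∀ g ∈ R, g ≠ []) (hdis : ∀ g ∈ R, pvInter V g = false) (hfuel : R.length ≤ fuel) :
    pvALoop fuel R O V = O ++ pvScan (PySem.List.sorted R (fun g => g.length) true) V := by
  induction fuel generalizing R O V with
  | zero =>
    have hnil : R = [] := by cases R with | nil => rfl | cons a b => simp at hfuel
    subst hnil
    rw [(PySem.List.sorted_eq_nil_iff _ _ _).mpr rfl]
    simp [pvALoop, pvScan]
  | succ fuel ih =>
    cases R with
    | nil =>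
      rw [(PySem.List.sorted_eq_nil_iff _ _ _).mpr rfl]
      simp [pvALoop, pvScan]
    | cons r0 rt =>
      obtain ⟨g, rest, hs⟩ : ∃ g rest,
          PySem.List.sorted (r0 :: rt) (fun g => g.length) true = g :: rest := by
        cases hnil : PySem.List.sorted (r0 :: rt) (fun g => g.length) true with
        | nil => exact absurd ((PySem.List.sorted_eq_nil_iff _ _ _).mp hnil) (by simp)
        | cons a b => exact ⟨a, b, rfl⟩
      have hgmem : g ∈ r0 :: rt :=
        (PySem.List.mem_sorted _ _ _ g).mp (hs ▸ List.mem_cons_self)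
      have hmax : ∀ y ∈ r0 :: rt, y.length ≤ g.length :=
        PySem.List.key_head_sorted_rev_ge _ _ hs
      -- maxLen = len g
      have hmaxeq : PySem.List.max? ((r0 :: rt).map (fun g => g.length)) (fun x => x)
          = some g.length := by
        rw [List.map_cons, PySem.List.max?_id_cons]
        have hub : List.foldl max r0.length (rt.map (fun g => g.length)) ≤ g.length := by
          rcases PySem.List.foldl_max_mem (rt.map (fun g => g.length)) r0.length with h | h
          · rw [h]; exact hmax r0 List.mem_cons_self
          · rcases List.mem_map.mp h with ⟨y, hy, hyl⟩
            exact hyl ▸ hmax y (List.mem_cons_of_mem _ hy)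
        have hlb : g.length ≤ List.foldl max r0.length (rt.map (fun g => g.length)) := by
          rcases List.mem_cons.mp hgmem with rfl | hg
          · exact (PySem.List.le_foldl_max _ _).1
          · exact (PySem.List.le_foldl_max _ _).2 g.length (List.mem_map.mpr ⟨g, hg, rfl⟩)
        exact congrArg some (le_antisymm hub hlb)
      -- first group of maximal length is g (stability of the sort)
      have hfilter : (r0 :: rt).filter (fun h => h.length == g.length)
          = g :: rest.filter (fun h => h.length == g.length) := by
        have h1 : PySem.List.sorted ((r0 :: rt).filter (fun h => h.length == g.length))
            (fun g => g.length) true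
            = g :: rest.filter (fun h => h.length == g.length) := by
          rw [← pvSorted_filter, hs, List.filter_cons, if_pos (by simp)]
        have h2 : PySem.List.sorted ((r0 :: rt).filter (fun h => h.length == g.length))
            (fun g => g.length) true
            = (r0 :: rt).filter (fun h => h.length == g.length) := by
          apply PySem.List.sorted_rev_eq_self_of_pairwise
          apply List.pairwise_of_forall_mem_list
          intro a ha b hb
          have ha' : a.length = g.length := by simpa using (List.mem_filter.mp ha).2
          have hb' : b.length = g.length := by simpa using (List.mem_filter.mp hb).2
          omega
        exact h2.symm.trans h1
      have hhead : ((r0 :: rt).filter (fun h => h.length == g.length)).head? = some g := by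
        rw [hfilter]; rfl
      -- unfold one round of A's loop
      rw [pvALoop, if_neg (by simp), hmaxeq]
      simp only [hhead]
      -- the removal pass computes the filter by "disjoint from the enlarged visited set"
      have hgtr : ((r0 :: rt).foldl
          (fun acc h => if h.any (fun n => PySem.Set.contains (PySem.Set.update V g) n)
            then acc ++ [h] else acc) [])
          = (r0 :: rt).filter (fun h => pvInter (PySem.Set.update V g) h) := by
        rw [PySem.List.foldl_append_if
          (fun (h : List String) => h.any fun n => (PySem.Set.update V g).contains n)
          (fun h => h)]
        simp [pvInter]
      have hremove : ((r0 :: rt).filter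
          (fun h => !(((r0 :: rt).filter (fun h => pvInter (PySem.Set.update V g) h)).contains h)))
          = (r0 :: rt).filter (fun h => !pvInter (PySem.Set.update V g) h) := by
        apply List.filter_congr
        intro h hh
        by_cases hx : pvInter (PySem.Set.update V g) h = true
        · simp [List.mem_filter, hh, hx]
        · simp only [Bool.not_eq_true] at hx
          simp [List.mem_filter, hx]
      -- g itself is removed: it meets the enlarged visited set
      have hgin : pvInter (PySem.Set.update V g) g = true := by
        obtain ⟨n, hn⟩ : ∃ n, n ∈ g := by
          cases hgnil : g with
          | nil => exact absurd hgnil (hne g hgmem)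
          | cons n t => exact ⟨n, by simp⟩
        refine List.any_eq_true.mpr ⟨n, hn, ?_⟩
        simp only [PySem.Set.contains, List.contains_iff_mem]
        exact (PySem.Set.mem_update V g n).mpr (Or.inr hn)
      set V' := PySem.Set.update V g with hV'
      set R' := (r0 :: rt).filter (fun h => !pvInter V' h) with hR'
      have hlen : R'.length < (r0 :: rt).length := by
        apply List.length_filter_lt_length_iff_exists.mpr
        exact ⟨g, hgmem, by simp [hgin]⟩
      have hstep : pvALoop fuel R' (O ++ [PySem.List.sorted g (fun s => s) false]) V'
          = (O ++ [PySem.List.sorted g (fun s => s) false])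
            ++ pvScan (PySem.List.sorted R' (fun g => g.length) true) V' := by
        apply ih
        · intro h hh; exact hne h (List.mem_of_mem_filter hh)
        · intro h hh
          have := (List.mem_filter.mp hh).2
          simpa using this
        · omega
      simp only [hgtr, hremove]
      rw [hstep]
      -- B's scan takes g and then ignores the removed groups
      have hsortR' : PySem.List.sorted R' (fun g => g.length) true
          = rest.filter (fun h => !pvInter V' h) := by
        rw [hR', ← pvSorted_filter, hs, List.filter_cons, if_neg (by simp [hgin])]
      have hscan : pvScan (PySem.List.sorted R' (fun g => g.length) true) V'
          = pvScan rest V' := by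
        rw [hsortR']
        exact pvScan_filter V' rest V' (fun g h => h)
      rw [hscan, hs]
      have hgV : pvInter V g = false := hdis g hgmem
      simp [pvScan, hgV, hV']

-- ===== VERDICT (by name: the statement is the Claim_ definition above) =====
theorem mpiPingpongGetLargestNonoverlappingGroups_spec : Claim_equal_mpiPingpongGetLargestNonoverlappingGroups := by
  intro groups _ hpre
  unfold Spec_mpiPingpongGetLargestNonoverlappingGroups
  unfold mpiPingpongGetLargestNonoverlappingGroups mpiPingpongGetLargestNonoverlappingGroups_alt
  rw [pvFoldl_eq_scan]
  have h0 : ∀ g ∈ groups, pvInter PySem.Set.empty g = false := by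
    intro g _
    simp [pvInter, PySem.Set.contains, PySem.Set.empty]
  rw [pvMain groups.length groups [] PySem.Set.empty hpre h0 le_rfl]
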